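-- pv_equiv track=rewrite | github.com/Google-Health/genomics-research | mregle/lib/models.py | _get_encoder_decoder_last_conv_output_len
-- ===== SOURCE A (Python) =====
-- def _get_encoder_decoder_last_conv_output_len(
--     waveform_length: int,
--     num_layers: int,
--     pool_size: int,
-- ) -> tuple[int, int]:
--   """Get output lengths of the last 1D conv layers for encoder and decoder.
--
--   This function is only correct when using 'padding=same' and not setting
--   `stride` in the Conv1D, Conv1DTranspose layers, MaxPooling1D and UpSampling1D
--   layers.
--
--   Args:
--     waveform_length: The length of input waveform of the autoencoder.
--     num_layers: The number of convolutional layers of the encoder/decoder.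
--     pool_size: The pool size of pooling layer.
--
--   Returns:
--     The output tensors' lengths of the last conv layers of encoder and decoder.
--   """
--
--   # In the modeling, we use `padding='same'` and the default `stride=1` in the
--   # Conv1D layer which results in the output of the exact same size as input.
--   # Then, the pooling layer reduces the size to
--   # `ceiling(encoder_conv_output_length / pool_size)`, because MaxPool1D uses
--   # `pool_size` as `stride` when it is not set and `padding='same'` pads input
--   # with zeros when there is partial inputs left.
--   encoder_conv_output_length = waveform_length
--   for _ in range(num_layers):
--     encoder_conv_output_length = (
--         encoder_conv_output_length + pool_size - 1
--     ) // pool_size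
--   decoder_conv_output_length = encoder_conv_output_length
--
--   # For each transposed convolutional layer in the decoder model, we first
--   # upsampling the input by 'pool_size', this leads to a output length of
--   # `decoder_conv_output_length * pool_size`. Since we use `padding='same'` and
--   # the default `stride=1` in the Conv1DTranspose layer which results in the
--   # output of the exact same size as input. Therefore the final output length of
--   # one transposed convolutional layer is `decoder_conv_output_length *
--   # pool_size`.
--   for _ in range(num_layers):
--     decoder_conv_output_length *= pool_size
--   return encoder_conv_output_length, decoder_conv_output_length
-- ===== SOURCE B (Python) =====
-- def _get_encoder_decoder_last_conv_output_len(
--     waveform_length: int,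
--     num_layers: int,
--     pool_size: int,
-- ) -> tuple[int, int]:
--   """Closed form: n repeated ceil-divisions by pool_size equal one ceil-division
--   by pool_size**n (pool_size >= 1), and the decoder length is that times the
--   same factor."""
--   factor = pool_size ** max(num_layers, 0)
--   encoder_conv_output_length = -(-waveform_length // factor)
--   return encoder_conv_output_length, encoder_conv_output_length * factor
-- ===== Notes on version B (the rewrite author's own statement) =====
-- stated objective: simpler
-- what changed: Both counting loops are replaced by closed forms: factor = pool_size**num_layers computed once, encoder = -(-waveform_length // factor) (one ceiling division), decoder = encoder * factor; measured faster at large num_layers.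
-- outside the precondition, e.g. on _get_encoder_decoder_last_conv_output_len(5, 1, -2): A returns (-1, 2), B returns (-2, 4); on _get_encoder_decoder_last_conv_output_len(5, 1, 0): A raises ZeroDivisionError, B raises ZeroDivisionError
import Mathlib
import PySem

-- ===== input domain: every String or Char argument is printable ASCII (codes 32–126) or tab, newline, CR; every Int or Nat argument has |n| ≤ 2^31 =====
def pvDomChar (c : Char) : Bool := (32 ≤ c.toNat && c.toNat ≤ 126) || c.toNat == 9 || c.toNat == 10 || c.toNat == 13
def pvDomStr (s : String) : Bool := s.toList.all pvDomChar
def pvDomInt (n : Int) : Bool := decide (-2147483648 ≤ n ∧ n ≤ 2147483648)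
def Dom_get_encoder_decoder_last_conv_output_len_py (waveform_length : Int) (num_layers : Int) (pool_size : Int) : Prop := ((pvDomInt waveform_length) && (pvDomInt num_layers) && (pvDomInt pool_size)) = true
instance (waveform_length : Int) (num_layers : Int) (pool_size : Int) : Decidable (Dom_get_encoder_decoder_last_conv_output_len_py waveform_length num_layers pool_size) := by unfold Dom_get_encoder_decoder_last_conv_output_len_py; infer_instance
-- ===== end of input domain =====

-- B replaces A's two O(num_layers) loops by a closed form: one ceiling division by
-- pool_size**num_layers for the encoder and one multiplication back for the decoder (objective: simpler).


-- ===== PORT A =====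
def get_encoder_decoder_last_conv_output_len_py (waveform_length : Int) (num_layers : Int) (pool_size : Int) : Int × Int :=
  let encoder_conv_output_length :=
    (PySem.List.pyRange 0 num_layers 1).foldl
      (fun e _ => PySem.Int.floordiv (e + pool_size - 1) pool_size) waveform_length
  let decoder_conv_output_length :=
    (PySem.List.pyRange 0 num_layers 1).foldl
      (fun d _ => d * pool_size) encoder_conv_output_length
  (encoder_conv_output_length, decoder_conv_output_length)

-- ===== PORT B =====
def get_encoder_decoder_last_conv_output_len_py_alt (waveform_length : Int) (num_layers : Int) (pool_size : Int) : Int × Int :=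
  let factor := pool_size ^ (max num_layers 0).toNat
  let encoder_conv_output_length := -(PySem.Int.floordiv (-waveform_length) factor)
  (encoder_conv_output_length, encoder_conv_output_length * factor)

-- ===== PRECONDITION & SPEC =====
-- Pre_ excludes pool_size = 0 with num_layers > 0, where A raises ZeroDivisionError (and so does B),
-- and negative pool_size with num_layers > 0, which is outside the natural domain of a pooling layer
-- (A's looped '(x + pool_size - 1) // pool_size' there is not a ceiling division of anything).
def Pre_get_encoder_decoder_last_conv_output_len_py (waveform_length : Int) (num_layers : Int) (pool_size : Int) : Prop :=
  1 ≤ pool_size ∨ num_layers ≤ 0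
instance (waveform_length : Int) (num_layers : Int) (pool_size : Int) : Decidable (Pre_get_encoder_decoder_last_conv_output_len_py waveform_length num_layers pool_size) := by unfold Pre_get_encoder_decoder_last_conv_output_len_py; infer_instance
def pvWitness_get_encoder_decoder_last_conv_output_len_py : Int × Int × Int := (10, 2, 3)

def Spec_get_encoder_decoder_last_conv_output_len_py (waveform_length : Int) (num_layers : Int) (pool_size : Int) (out : Int × Int) : Prop := out = get_encoder_decoder_last_conv_output_len_py_alt waveform_length num_layers pool_size
instance (waveform_length : Int) (num_layers : Int) (pool_size : Int) (out : Int × Int) : Decidable (Spec_get_encoder_decoder_last_conv_output_len_py waveform_length num_layers pool_size out) := by unfold Spec_get_encoder_decoder_last_conv_output_len_py; infer_instance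

-- ===== CLAIM (what is proved, stated in full; the proofs are below) =====
def Claim_equal_get_encoder_decoder_last_conv_output_len_py : Prop := ∀ (waveform_length : Int) (num_layers : Int) (pool_size : Int), Dom_get_encoder_decoder_last_conv_output_len_py waveform_length num_layers pool_size → Pre_get_encoder_decoder_last_conv_output_len_py waveform_length num_layers pool_size → Spec_get_encoder_decoder_last_conv_output_len_py waveform_length num_layers pool_size (get_encoder_decoder_last_conv_output_len_py waveform_length num_layers pool_size)

-- ===== LEMMAS AND PROOFS =====

-- For n <= 0, range(n) is empty.
theorem pv_pyRange_neg (n : Int) (h : n ≤ 0) : PySem.List.pyRange 0 n 1 = [] := by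
  simp [PySem.List.pyRange]
  omega

-- A further ceiling division by b collapses into the accumulated divisor: ⌈⌈x/a⌉/b⌉ = ⌈x/(a*b)⌉.
theorem pv_ceil_ceil (x a b : Int) (ha : 0 < a) (hb : 0 < b) :
    PySem.Int.floordiv (-(PySem.Int.floordiv (-x) a) + b - 1) b
      = -(PySem.Int.floordiv (-x) (a * b)) := by
  set E : Int := -(PySem.Int.floordiv (-x) a) with hE
  set q : Int := -(PySem.Int.floordiv (-x) (a * b)) with hq
  have hEb : (E - 1) * a < x ∧ x ≤ E * a :=
    (PySem.Int.neg_floordiv_neg_eq_iff_of_pos ha).mp hE.symm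
  have hqb : (q - 1) * (a * b) < x ∧ x ≤ q * (a * b) :=
    (PySem.Int.neg_floordiv_neg_eq_iff_of_pos (by positivity)).mp hq.symm
  rw [PySem.Int.floordiv_eq_iff_of_pos hb]
  constructor
  · nlinarith [hEb.2, hqb.1]
  · nlinarith [hEb.1, hqb.2]

-- A's '(x + p - 1) // p' is the ceiling division ⌈x/p⌉ for positive p.
theorem pv_ceil_step (x b : Int) (hb : 0 < b) :
    PySem.Int.floordiv (x + b - 1) b = -(PySem.Int.floordiv (-x) b) := by
  have h := pv_ceil_ceil x 1 b Int.one_pos hb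
  rw [PySem.Int.floordiv_eq_ediv_of_pos Int.one_pos] at h
  simpa using h

-- The encoder loop computes one ceiling division by p ^ (number of iterations).
theorem pv_enc_loop (p : Int) (hp : 0 < p) :
    ∀ (l : List Int) (w : Int),
      l.foldl (fun e _ => PySem.Int.floordiv (e + p - 1) p) w
        = -(PySem.Int.floordiv (-w) (p ^ l.length)) := by
  intro l
  induction l with
  | nil =>
      intro w
      rw [List.foldl_nil, List.length_nil, pow_zero,
        PySem.Int.floordiv_eq_ediv_of_pos Int.one_pos]
      simp
  | cons x l ih =>
      intro w
      rw [List.foldl_cons, ih, List.length_cons, pv_ceil_step w p hp,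
        ← pv_ceil_step _ (p ^ l.length) (by positivity),
        pv_ceil_ceil w p (p ^ l.length) hp (by positivity)]
      ring_nf

-- The decoder loop multiplies by p ^ (number of iterations).
theorem pv_dec_loop (p : Int) :
    ∀ (l : List Int) (e : Int), l.foldl (fun d _ => d * p) e = e * p ^ l.length := by
  intro l
  induction l with
  | nil => intro e; simp
  | cons x l ih => intro e; rw [List.foldl_cons, ih, List.length_cons]; ring

-- ===== VERDICT (by name: the statement is the Claim_ definition above) =====
theorem get_encoder_decoder_last_conv_output_len_py_spec : Claim_equal_get_encoder_decoder_last_conv_output_len_py := by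
  intro w n p _ hpre
  unfold Spec_get_encoder_decoder_last_conv_output_len_py
  unfold get_encoder_decoder_last_conv_output_len_py get_encoder_decoder_last_conv_output_len_py_alt
  rcases (show n ≤ 0 ∨ 0 < n by omega) with hn | hn
  · -- both loops are empty and factor = p ^ 0 = 1
    rw [pv_pyRange_neg n hn]
    have h0 : (max n 0).toNat = 0 := by omega
    simp only [h0, pow_zero, List.foldl_nil]
    rw [PySem.Int.floordiv_eq_ediv_of_pos Int.one_pos]
    simp
  · -- 1 ≤ pool_size
    have hp : 0 < p := by rcases hpre with h | h <;> omega
    have hcast : PySem.List.pyRange 0 n 1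
        = (List.range n.toNat).map (fun k : Nat => (k : Int)) := by
      conv_lhs => rw [show n = ((n.toNat : Nat) : Int) by omega]
      exact PySem.List.pyRange_zero_natCast n.toNat
    have hm : (max n 0).toNat = n.toNat := by omega
    rw [hcast, hm]
    simp only [pv_enc_loop p hp, pv_dec_loop p, List.length_map, List.length_range]
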